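-- pv_equiv track=rewrite | github.com/scotty800/java_learn | test_ex_2.py | est_palindrome
-- ===== SOURCE A (Python) =====
-- def est_palindrome(mot):
--     mot = mot.lower().replace(" ", "")
--
--     left = 0
--     right = len(mot) - 1
--
--     while left < right:
--         if mot[left] != mot[right]:
--             return False
--         left += 1
--         right -= 1
--
--     return True
-- ===== SOURCE B (Python) =====
-- def est_palindrome(mot):
--     mot = mot.lower().replace(" ", "")
--     return mot == mot[::-1]
-- ===== Notes on version B (the rewrite author's own statement) =====
-- stated objective: idiomatic
-- what changed: Replaces the two-pointer while loop with early exit by a single comparison of the normalized string against its reversed slice mot[::-1].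
import Mathlib
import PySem

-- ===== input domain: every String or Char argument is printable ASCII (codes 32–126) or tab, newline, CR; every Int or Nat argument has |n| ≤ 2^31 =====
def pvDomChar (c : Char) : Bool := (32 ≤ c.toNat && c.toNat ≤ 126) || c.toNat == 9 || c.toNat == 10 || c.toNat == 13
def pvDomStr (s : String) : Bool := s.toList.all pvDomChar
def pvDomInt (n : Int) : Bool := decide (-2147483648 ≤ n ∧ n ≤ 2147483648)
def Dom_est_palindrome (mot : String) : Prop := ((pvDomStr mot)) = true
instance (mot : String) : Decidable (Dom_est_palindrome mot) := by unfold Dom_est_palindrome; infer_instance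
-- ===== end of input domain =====

-- B replaces A's two-pointer while loop by comparing the normalized string with its reversed slice (idiomatic; same cost).

-- ===== PORT A =====
-- the while loop: left/right walk inward; both indices are always in range while left < right,
-- so pyGetD's default character is never used
def palLoopA (cs : List Char) (left right : Int) : Bool :=
  if left < right then
    if PySem.List.pyGetD cs left ' ' ≠ PySem.List.pyGetD cs right ' ' then false
    else palLoopA cs (left + 1) (right - 1)
  else true
termination_by (right - left).toNat
decreasing_by omega

def est_palindrome (mot : String) : Bool :=
  let m := (PySem.Str.replace (PySem.Str.lower mot) " " "").toList
  palLoopA m 0 (PySem.List.len m - 1)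

-- ===== PORT B =====
def est_palindrome_alt (mot : String) : Bool :=
  let m := PySem.Str.replace (PySem.Str.lower mot) " " ""
  match PySem.Str.slice? m none none (-1) with
  | some r => m == r
  | none => false  -- unreachable: the step -1 is nonzero

-- ===== PRECONDITION & SPEC =====
def Spec_est_palindrome (mot : String) (out : Bool) : Prop := out = est_palindrome_alt mot
instance (mot : String) (out : Bool) : Decidable (Spec_est_palindrome mot out) := by unfold Spec_est_palindrome; infer_instance

-- ===== CLAIM (what is proved, stated in full; the proofs are below) =====
def Claim_equal_est_palindrome : Prop := ∀ (mot : String), Dom_est_palindrome mot → Spec_est_palindrome mot (est_palindrome mot)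

-- ===== LEMMAS AND PROOFS =====

-- A's loop, started at (a, n-1-a), decides the mirror condition for every index i in [a, n-1-a)
lemma palLoopA_key (cs : List Char) (k : Nat) : ∀ a : Nat, cs.length - a ≤ k →
    palLoopA cs a ((cs.length : Int) - 1 - a) =
      decide (∀ i < cs.length, a ≤ i → i + 1 + a < cs.length →
        cs.getD i ' ' = cs.getD (cs.length - 1 - i) ' ') := by
  induction k with
  | zero =>
    intro a ha
    unfold palLoopA
    rw [if_neg (by omega : ¬ ((a : Int) < (cs.length : Int) - 1 - a))]
    symm; rw [decide_eq_true_eq]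
    intro i hi hai hb; omega
  | succ k ih =>
    intro a ha
    by_cases h : (a : Int) < (cs.length : Int) - 1 - a
    · have ha1 : a < cs.length := by omega
      have ha2 : cs.length - 1 - a < cs.length := by omega
      unfold palLoopA
      rw [if_pos h]
      have e1 : PySem.List.pyGetD cs (a : Int) ' ' = cs.getD a ' ' := by
        simp [PySem.List.pyGetD_natCast]
      have ecast : ((cs.length : Int) - 1 - a) = ((cs.length - 1 - a : Nat) : Int) := by omega
      have e2 : PySem.List.pyGetD cs ((cs.length : Int) - 1 - a) ' ' = cs.getD (cs.length - 1 - a) ' ' := by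
        rw [ecast]; simp [PySem.List.pyGetD_natCast]
      rw [e1, e2]
      by_cases hc : cs.getD a ' ' = cs.getD (cs.length - 1 - a) ' '
      · rw [if_neg (not_not_intro hc)]
        have ecast2 : ((a : Int) + 1) = ((a + 1 : Nat) : Int) := by push_cast; ring
        have estep : (cs.length : Int) - 1 - a - 1 = (cs.length : Int) - 1 - ((a + 1 : Nat) : Int) := by
          push_cast; ring
        rw [ecast2, estep, ih (a + 1) (by omega)]
        rw [decide_eq_decide]
        constructor
        · intro Q i hi hai hbnd
          rcases Nat.eq_or_lt_of_le hai with heq | hlt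
          · rw [← heq]; exact hc
          · by_cases hb2 : i + 1 + (a + 1) < cs.length
            · exact Q i hi hlt hb2
            · have hrev : cs.length - 1 - i = a + 1 := by omega
              rw [hrev]
              rcases Nat.lt_or_ge (a + 1) i with hlt2 | hge
              · have hq := Q (a + 1) (by omega) (le_refl _) (by omega)
                have hri : cs.length - 1 - (a + 1) = i := by omega
                rw [hri] at hq
                exact hq.symm
              · have hia : i = a + 1 := by omega
                rw [hia]
        · intro Q i hi hai hbnd
          exact Q i hi (by omega) (by omega)
      · rw [if_pos hc]
        symm; rw [decide_eq_false_iff_not]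
        intro Q
        exact hc (Q a ha1 (le_refl a) (by omega))
    · unfold palLoopA
      rw [if_neg h]
      symm; rw [decide_eq_true_eq]
      intro i hi hai hbnd
      exfalso; omega

lemma palLoopA_eq (cs : List Char) (a : Nat) :
    palLoopA cs a ((cs.length : Int) - 1 - a) =
      decide (∀ i < cs.length, a ≤ i → i + 1 + a < cs.length →
        cs.getD i ' ' = cs.getD (cs.length - 1 - i) ' ') :=
  palLoopA_key cs (cs.length - a) a (le_refl _)

-- the mirror condition is exactly "the list equals its reverse"
lemma pal_iff (cs : List Char) :
    (∀ i < cs.length, i + 1 < cs.length → cs.getD i ' ' = cs.getD (cs.length - 1 - i) ' ') ↔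
      cs.reverse = cs := by
  constructor
  · intro H
    apply List.ext_getElem (by simp)
    intro i h1 h2
    rw [List.getElem_reverse]
    by_cases hb : i + 1 < cs.length
    · have hh := H i h2 hb
      rw [List.getD_eq_getElem _ _ h2, List.getD_eq_getElem _ _ (by omega)] at hh
      exact hh.symm
    · by_cases h1' : cs.length = 1
      · simp only [show cs.length - 1 - i = i from by omega]
      · have hh := H 0 (by omega) (by omega)
        rw [List.getD_eq_getElem _ _ (by omega), List.getD_eq_getElem _ _ (by omega)] at hh
        simp only [show cs.length - 1 - i = 0 from by omega]
        simp only [show cs.length - 1 - 0 = i from by omega] at hh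
        exact hh
  · intro h i hi hb
    have h2 : cs.reverse.getD i ' ' = cs.getD i ' ' := by rw [h]
    rw [List.getD_eq_getElem _ _ (by simpa using hi), List.getElem_reverse,
      List.getD_eq_getElem _ _ hi] at h2
    rw [List.getD_eq_getElem _ _ hi, List.getD_eq_getElem _ _ (by omega)]
    exact h2.symm

lemma beq_toList (s t : String) : (s == t) = decide (s.toList = t.toList) := by
  rw [Bool.eq_iff_iff]
  simp only [beq_iff_eq, decide_eq_true_eq]
  exact String.ext_iff

theorem main_eq (mot : String) : est_palindrome mot = est_palindrome_alt mot := by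
  show palLoopA (PySem.Str.replace (PySem.Str.lower mot) " " "").toList 0
      (PySem.List.len (PySem.Str.replace (PySem.Str.lower mot) " " "").toList - 1) =
    (match PySem.Str.slice? (PySem.Str.replace (PySem.Str.lower mot) " " "") none none (-1) with
     | some r => PySem.Str.replace (PySem.Str.lower mot) " " "" == r
     | none => false)
  rw [PySem.Str.slice?_none_none_neg_one]
  set m := PySem.Str.replace (PySem.Str.lower mot) " " "" with hm
  show palLoopA m.toList 0 (PySem.List.len m.toList - 1) = (m == String.ofList m.toList.reverse)
  rw [PySem.List.len_eq, beq_toList, String.toList_ofList]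
  have h0 := palLoopA_eq m.toList 0
  simp only [Nat.cast_zero, Int.sub_zero] at h0
  rw [h0, decide_eq_decide]
  rw [show (m.toList = m.toList.reverse) ↔ (m.toList.reverse = m.toList) from eq_comm, ← pal_iff]
  constructor
  · intro H i hi hb
    have hh := H i hi (Nat.zero_le i) (by omega)
    simpa using hh
  · intro H i hi _ hb
    exact H i hi (by omega)

-- ===== VERDICT (by name: the statement is the Claim_ definition above) =====
theorem est_palindrome_spec : Claim_equal_est_palindrome := by
  intro mot _
  show _ = _
  exact main_eq mot
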